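-- pv_equiv track=rewrite | github.com/AP-MI-2021/lab-4-MarianMutu | main.py | det_palidroame_din_a_concatenat_b
-- ===== SOURCE A (Python) =====
-- def is_palindrome(nr):
--     """
--     determina daca un nr scris sub forma de sir de caractere e palindrom sau nu
--     :param nr: string
--     :return: true or false
--     """
--     var = nr[::-1]
--     if var == nr:
--         return True
--     else:
--         return False
--
-- def det_palidroame_din_a_concatenat_b(lst_a, lst_b):
--     """
--     determina palindroamele obtinute prin concatenarea nr de pe aceleasi pozitii
--     :param lst_a: multimea A
--     :param lst_b: multimea B
--     :return: lista rezultata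
--     variabila var este de tip string
--     """
--     rez = []
--     for x in range(len(lst_a)):
--         for y in range(len(lst_b)):
--             if x == y:
--                 var = str(lst_a[x]) + str(lst_b[y])
--                 if is_palindrome(var):
--                     rez.append(int(var))
--     return rez
-- ===== SOURCE B (Python) =====
-- def det_palidroame_din_a_concatenat_b(lst_a, lst_b):
--     rez = []
--     for a, b in zip(lst_a, lst_b):
--         var = str(a) + str(b)
--         if var == var[::-1]:
--             rez.append(int(var))
--     return rez
-- ===== Notes on version B (the rewrite author's own statement) =====
-- stated objective: faster
-- what changed: Replaced the quadratic double loop over all index pairs (filtered by x == y) with a single linear pass over zip(lst_a, lst_b), pairing same-position elements directly.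
import Mathlib
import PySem

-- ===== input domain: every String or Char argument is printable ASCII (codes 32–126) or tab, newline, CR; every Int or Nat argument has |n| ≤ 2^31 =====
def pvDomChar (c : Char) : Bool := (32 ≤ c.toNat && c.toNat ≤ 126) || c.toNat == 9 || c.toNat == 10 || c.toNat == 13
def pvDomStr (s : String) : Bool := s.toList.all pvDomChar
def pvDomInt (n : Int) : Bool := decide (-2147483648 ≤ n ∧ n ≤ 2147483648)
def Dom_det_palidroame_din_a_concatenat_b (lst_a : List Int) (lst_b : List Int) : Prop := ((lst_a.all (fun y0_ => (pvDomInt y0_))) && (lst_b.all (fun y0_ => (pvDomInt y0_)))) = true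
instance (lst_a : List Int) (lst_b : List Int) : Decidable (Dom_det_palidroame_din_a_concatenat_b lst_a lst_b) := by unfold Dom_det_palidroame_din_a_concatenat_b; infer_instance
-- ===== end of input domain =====

-- B replaces A's quadratic double loop (all index pairs, filtered by x == y) with one linear pass over zip(lst_a, lst_b).

-- ===== PORT A =====
-- is_palindrome(nr): var = nr[::-1]; if var == nr: True else False
def pvIsPalindrome (nr : List Char) : Bool :=
  let var := (PySem.List.slice? nr none none (-1)).getD []
  if var == nr then true else false

def det_palidroame_din_a_concatenat_b (lst_a : List Int) (lst_b : List Int) : List Int :=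
  (PySem.List.pyRange 0 (lst_a.length : Int) 1).foldl (fun rez x =>
    (PySem.List.pyRange 0 (lst_b.length : Int) 1).foldl (fun rez y =>
      if x = y then
        let var := PySem.Int.toChars (PySem.List.pyGetD lst_a x 0) ++
                   PySem.Int.toChars (PySem.List.pyGetD lst_b y 0)
        -- int(var): under Pre_ the parse never fails; getD 0 is unreachable there
        if pvIsPalindrome var then rez ++ [(PySem.Int.ofChars? var).getD 0] else rez
      else rez) rez) []

-- ===== PORT B =====
-- single pass over zip(lst_a, lst_b)
def pvAltGo : List (Int × Int) → List Int
  | [] => []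
  | (a, b) :: rest =>
      let var := PySem.Int.toChars a ++ PySem.Int.toChars b
      if var == var.reverse then (PySem.Int.ofChars? var).getD 0 :: pvAltGo rest
      else pvAltGo rest

def det_palidroame_din_a_concatenat_b_alt (lst_a : List Int) (lst_b : List Int) : List Int :=
  pvAltGo (lst_a.zip lst_b)

-- ===== PRECONDITION & SPEC =====
-- Pre_ excludes exactly the inputs where some same-position pair with a negative second
-- component concatenates to a palindromic string: there Python's int() raises ValueError
-- in A (and B raises identically), so A returns no value on those inputs.
def Pre_det_palidroame_din_a_concatenat_b (lst_a : List Int) (lst_b : List Int) : Prop :=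
  ∀ p ∈ lst_a.zip lst_b, p.2 < 0 →
    (PySem.Int.toChars p.1 ++ PySem.Int.toChars p.2).reverse ≠
      PySem.Int.toChars p.1 ++ PySem.Int.toChars p.2
instance (lst_a : List Int) (lst_b : List Int) : Decidable (Pre_det_palidroame_din_a_concatenat_b lst_a lst_b) := by unfold Pre_det_palidroame_din_a_concatenat_b; infer_instance

def pvWitness_det_palidroame_din_a_concatenat_b : List Int × List Int := ([1, 22, 3], [1, 22, 4])

def Spec_det_palidroame_din_a_concatenat_b (lst_a : List Int) (lst_b : List Int) (out : List Int) : Prop := out = det_palidroame_din_a_concatenat_b_alt lst_a lst_b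
instance (lst_a : List Int) (lst_b : List Int) (out : List Int) : Decidable (Spec_det_palidroame_din_a_concatenat_b lst_a lst_b out) := by unfold Spec_det_palidroame_din_a_concatenat_b; infer_instance

-- ===== CLAIM (what is proved, stated in full; the proofs are below) =====
def Claim_equal_det_palidroame_din_a_concatenat_b : Prop := ∀ (lst_a : List Int) (lst_b : List Int), Dom_det_palidroame_din_a_concatenat_b lst_a lst_b → Pre_det_palidroame_din_a_concatenat_b lst_a lst_b → Spec_det_palidroame_din_a_concatenat_b lst_a lst_b (det_palidroame_din_a_concatenat_b lst_a lst_b)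

-- ===== LEMMAS AND PROOFS =====

-- what one hit of A's inner loop appends, as a list
def pvEmit (a b : Int) : List Int :=
  let var := PySem.Int.toChars a ++ PySem.Int.toChars b
  if pvIsPalindrome var then [(PySem.Int.ofChars? var).getD 0] else []

lemma pvIsPalindrome_eq (v : List Char) : pvIsPalindrome v = (v == v.reverse) := by
  unfold pvIsPalindrome
  rw [PySem.List.slice?_none_none_neg_one]
  simp only [Option.getD_some]
  by_cases h : v = v.reverse
  · rw [← h]; simp
  · have h1 : (v.reverse == v) = false := by
      simp only [beq_eq_false_iff_ne, ne_eq]; exact fun e => h e.symm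
    have h2 : (v == v.reverse) = false := by simp [beq_eq_false_iff_ne, h]
    simp [h1, h2]

-- a fold over range n whose body fires only at j = x
lemma pv_single_hit (f : List Int → Nat → List Int) (x n : Nat) (acc : List Int) :
    (List.range n).foldl (fun rez j => if x = j then f rez j else rez) acc
      = if x < n then f acc x else acc := by
  induction n generalizing acc with
  | zero => simp
  | succ n ih =>
    rw [List.range_succ, List.foldl_append]
    by_cases hx : x = n
    · subst hx; simp [ih]
    · by_cases hlt : x < n
      · simp [ih, hlt, Nat.lt_succ_of_lt hlt, hx]
      · have : ¬ x < n + 1 := by omega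
        simp [ih, hlt, this, hx]

lemma pv_core (la lb : List Int) (acc : List Int) :
    (List.range la.length).foldl
        (fun rez i => if i < lb.length then rez ++ pvEmit (la.getD i 0) (lb.getD i 0) else rez) acc
      = acc ++ pvAltGo (la.zip lb) := by
  induction la generalizing lb acc with
  | nil => simp [pvAltGo]
  | cons a la ih =>
    cases lb with
    | nil =>
      simp only [List.zip_nil_right, pvAltGo, List.append_nil, List.length_nil]
      simp
    | cons b lb =>
      simp only [List.length_cons]
      rw [List.range_succ_eq_map, List.foldl_cons, List.foldl_map]
      simp only [List.getD_cons_succ, List.getD_cons_zero,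
        Nat.zero_lt_succ, if_pos, Nat.succ_lt_succ_iff]
      rw [ih lb]
      have : pvAltGo ((a, b) :: la.zip lb) = pvEmit a b ++ pvAltGo (la.zip lb) := by
        simp only [pvAltGo, pvEmit, pvIsPalindrome_eq]
        split <;> simp
      simp [this]

-- ===== VERDICT (by name: the statement is the Claim_ definition above) =====
theorem det_palidroame_din_a_concatenat_b_spec : Claim_equal_det_palidroame_din_a_concatenat_b := by
  intro lst_a lst_b _hdom _hpre
  show det_palidroame_din_a_concatenat_b lst_a lst_b = det_palidroame_din_a_concatenat_b_alt lst_a lst_b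
  unfold det_palidroame_din_a_concatenat_b det_palidroame_din_a_concatenat_b_alt
  rw [PySem.List.pyRange_zero_natCast, PySem.List.pyRange_zero_natCast,
    List.foldl_map]
  have hinner : (fun (rez : List Int) (i : Nat) =>
      ((List.range lst_b.length).map (Nat.cast : Nat → Int)).foldl (fun rez y =>
        if (i : Int) = y then
          let var := PySem.Int.toChars (PySem.List.pyGetD lst_a (i : Int) 0) ++
                     PySem.Int.toChars (PySem.List.pyGetD lst_b y 0)
          if pvIsPalindrome var then rez ++ [(PySem.Int.ofChars? var).getD 0] else rez
        else rez) rez)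
      = (fun (rez : List Int) (i : Nat) =>
          if i < lst_b.length then rez ++ pvEmit (lst_a.getD i 0) (lst_b.getD i 0) else rez) := by
    funext rez i
    rw [List.foldl_map]
    simp only [Nat.cast_inj, PySem.List.pyGetD_natCast]
    rw [pv_single_hit (fun rez j =>
      let var := PySem.Int.toChars (lst_a.getD i 0) ++ PySem.Int.toChars (lst_b.getD j 0)
      if pvIsPalindrome var then rez ++ [(PySem.Int.ofChars? var).getD 0] else rez) i lst_b.length rez]
    simp only [pvEmit]
    split
    · split <;> simp
    · rfl
  rw [hinner, pv_core]
  simp
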